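-- pv_equiv track=rewrite | github.com/ewoest/advent-of-code | 2021/day16/puzzle1.py | extract_literal
-- ===== SOURCE A (Python) =====
-- def calc_dec(binstr, pos=0, length=0):
--     numcol = length if length != 0 else len(binstr)
--     retval = 0
--     for col in range(numcol):
--         bit = int(binstr[pos + col])
--         val = (bit * (2 ** (numcol - col - 1)))
--         retval += val
--     return retval
--
-- def extract_literal(binstr, start_pos):
--     litstr = ''
--     pos = start_pos
--     indicator = '1'
--
--     while indicator == '1':
--         indicator = binstr[pos]
--         litstr += binstr[pos+1:pos+5]
--         pos += 5
--
--     return (calc_dec(litstr), pos)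
-- ===== SOURCE B (Python) =====
-- def extract_literal(binstr, start_pos):
--     # Single fused pass: accumulate the value while reading, no litstr / second pass.
--     value = 0
--     pos = start_pos
--     while True:
--         indicator = binstr[pos]
--         for c in binstr[pos+1:pos+5]:
--             value = value * 2 + int(c)
--         pos += 5
--         if indicator != '1':
--             return (value, pos)
-- ===== Notes on version B (the rewrite author's own statement) =====
-- stated objective: simpler
-- what changed: B drops calc_dec and the litstr buffer entirely: the numeric value is accumulated in the single reading loop (Horner step value = value*2 + int(c) per group character), instead of A's build-string-then-second-conversion-pass structure.
import Mathlib
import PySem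

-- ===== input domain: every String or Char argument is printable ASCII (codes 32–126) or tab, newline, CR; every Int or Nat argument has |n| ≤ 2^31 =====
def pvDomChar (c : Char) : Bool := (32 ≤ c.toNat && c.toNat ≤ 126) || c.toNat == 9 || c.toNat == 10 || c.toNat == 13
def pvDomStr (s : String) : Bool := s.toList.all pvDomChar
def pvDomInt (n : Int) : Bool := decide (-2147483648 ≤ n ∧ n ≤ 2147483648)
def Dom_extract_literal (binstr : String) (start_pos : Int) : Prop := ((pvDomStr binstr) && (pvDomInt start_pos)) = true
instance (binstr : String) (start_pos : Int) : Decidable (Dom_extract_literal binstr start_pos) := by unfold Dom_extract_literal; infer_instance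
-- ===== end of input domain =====

-- B fuses the value accumulation into the reading loop (one pass, no litstr buffer and
-- no second calc_dec pass); objective: simpler.

-- ===== PORT A =====
-- calc_dec(binstr, pos, length); the `.getD 0` marks where Python's int()/indexing
-- would raise (excluded by Pre_); `.toNat` on the exponent is exact since the exponent
-- is nonnegative for every col produced by the range.
def pvCalcDec (binstr : List Char) (pos : Int) (length : Int) : Int :=
  let numcol : Int := if length ≠ 0 then length else (binstr.length : Int)
  (PySem.List.pyRange 0 numcol 1).foldl
    (fun retval col =>
      let bit : Int := ((PySem.Chars.pyGet? binstr (pos + col)).bind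
        (fun c => PySem.Int.ofChars? [c])).getD 0
      let val : Int := bit * 2 ^ (numcol - col - 1).toNat
      retval + val) 0

-- the while-loop of A; fuel (length+1) is an upper bound on the number of iterations
-- Python can perform before returning or raising; `none` = IndexError (excluded by Pre_)
def pvLoopA (binstr : List Char) : Nat → List Char → Int → (List Char × Int)
  | 0, litstr, pos => (litstr, pos)
  | fuel + 1, litstr, pos =>
    match PySem.Chars.pyGet? binstr pos with
    | none => (litstr, pos)
    | some indicator =>
      let litstr' := litstr ++ PySem.Chars.slice binstr (some (pos + 1)) (some (pos + 5))
      let pos' := pos + 5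
      if indicator = '1' then pvLoopA binstr fuel litstr' pos' else (litstr', pos')

def extract_literal (binstr : String) (start_pos : Int) : Int × Int :=
  let r := pvLoopA binstr.toList (binstr.toList.length + 1) [] start_pos
  (pvCalcDec r.1 0 0, r.2)

-- ===== PORT B =====
-- Source B: value accumulated in the single reading pass: value = value*2 + int(c) per char
def pvLoopB (binstr : List Char) : Nat → Int → Int → (Int × Int)
  | 0, value, pos => (value, pos)
  | fuel + 1, value, pos =>
    match PySem.Chars.pyGet? binstr pos with
    | none => (value, pos)
    | some indicator =>
      let value' := (PySem.Chars.slice binstr (some (pos + 1)) (some (pos + 5))).foldl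
        (fun v c => v * 2 + (PySem.Int.ofChars? [c]).getD 0) value
      let pos' := pos + 5
      if indicator ≠ '1' then (value', pos') else pvLoopB binstr fuel value' pos'

def extract_literal_alt (binstr : String) (start_pos : Int) : Int × Int :=
  pvLoopB binstr.toList (binstr.toList.length + 1) 0 start_pos

-- ===== PRECONDITION & SPEC =====
-- Pre_ = exactly the inputs on which Python A returns: some k-th probed indicator
-- (positions start_pos, start_pos+5, …, Python index semantics) is in range and ≠ '1',
-- all earlier ones are '1', and every character of every read 4-bit group is a decimal
-- digit (otherwise int() raises ValueError); outside that A raises IndexError/ValueError.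
def Pre_extract_literal (binstr : String) (start_pos : Int) : Prop :=
  ∃ k : Nat, k < binstr.toList.length + 1 ∧
    (∀ i : Nat, i < k → PySem.Chars.pyGet? binstr.toList (start_pos + 5 * i) = some '1') ∧
    (PySem.Chars.pyGet? binstr.toList (start_pos + 5 * k)).isSome = true ∧
    PySem.Chars.pyGet? binstr.toList (start_pos + 5 * k) ≠ some '1' ∧
    (∀ i : Nat, i ≤ k →
      (PySem.Chars.slice binstr.toList (some (start_pos + 5 * i + 1))
        (some (start_pos + 5 * i + 5))).all (fun c => '0' ≤ c && c ≤ '9') = true)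
instance (binstr : String) (start_pos : Int) : Decidable (Pre_extract_literal binstr start_pos) := by
  unfold Pre_extract_literal; infer_instance
def pvWitness_extract_literal : String × Int := ("01111", 0)

def Spec_extract_literal (binstr : String) (start_pos : Int) (out : Int × Int) : Prop := out = extract_literal_alt binstr start_pos
instance (binstr : String) (start_pos : Int) (out : Int × Int) : Decidable (Spec_extract_literal binstr start_pos out) := by unfold Spec_extract_literal; infer_instance

-- ===== CLAIM (what is proved, stated in full; the proofs are below) =====
def Claim_equal_extract_literal : Prop := ∀ (binstr : String) (start_pos : Int), Dom_extract_literal binstr start_pos → Pre_extract_literal binstr start_pos → Spec_extract_literal binstr start_pos (extract_literal binstr start_pos)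

-- ===== LEMMAS AND PROOFS =====

-- digit value both ports extract from one character
def pvDig (c : Char) : Int := (PySem.Int.ofChars? [c]).getD 0

-- Horner fold over a list of digit values, with the closed sum it computes
lemma pv_horner : ∀ (ds : List Int) (v : Int),
    ds.foldl (fun v d => v * 2 + d) v
      = v * 2 ^ ds.length + ∑ k ∈ Finset.range ds.length, ds.getD k 0 * 2 ^ (ds.length - 1 - k) := by
  intro ds
  induction ds with
  | nil => intro v; simp
  | cons d t ih =>
    intro v
    rw [List.foldl_cons, ih]
    simp only [List.length_cons]
    rw [Finset.sum_range_succ']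
    simp only [List.getD_cons_succ, List.getD_cons_zero, Nat.sub_zero, Nat.add_sub_cancel]
    have hsum : ∑ k ∈ Finset.range t.length, t.getD k 0 * 2 ^ (t.length - (k + 1))
        = ∑ k ∈ Finset.range t.length, t.getD k 0 * 2 ^ (t.length - 1 - k) :=
      Finset.sum_congr rfl (fun k hk => by congr 2; omega)
    rw [hsum, pow_succ]
    ring

-- calc_dec over the whole accumulated string equals the fused Horner fold of B
lemma pv_calc_eq (l : List Char) :
    pvCalcDec l 0 0 = l.foldl (fun v c => v * 2 + (PySem.Int.ofChars? [c]).getD 0) 0 := by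
  have hfold : l.foldl (fun v c => v * 2 + (PySem.Int.ofChars? [c]).getD 0) 0
      = (l.map pvDig).foldl (fun v d => v * 2 + d) 0 := by
    rw [List.foldl_map]; rfl
  rw [hfold, pv_horner]
  simp only [List.length_map, zero_mul, zero_add]
  unfold pvCalcDec
  simp only [ne_eq, not_true_eq_false, if_false, zero_add,
    PySem.List.pyRange_one, sub_zero, Int.toNat_natCast, List.foldl_map]
  rw [PySem.List.foldl_add, zero_add]
  rw [show ((List.range l.length).map (fun y : Nat =>
      ((PySem.Chars.pyGet? l (y:Int)).bind fun a => PySem.Int.ofChars? [a]).getD 0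
        * 2 ^ (((l.length:Int) - (y:Int) - 1).toNat))).sum
    = ∑ k ∈ Finset.range l.length,
      ((PySem.Chars.pyGet? l (k:Int)).bind fun a => PySem.Int.ofChars? [a]).getD 0
        * 2 ^ (((l.length:Int) - (k:Int) - 1).toNat) from rfl]
  apply Finset.sum_congr rfl
  intro k hk
  have hk' : k < l.length := Finset.mem_range.mp hk
  rw [show PySem.Chars.pyGet? l ((k:Nat):Int) = l[k]? from PySem.List.pyGet?_natCast l k]
  rw [List.getElem?_eq_getElem hk']
  have hgetD : (l.map pvDig).getD k 0 = pvDig l[k] := by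
    rw [List.getD_eq_getElem?_getD, List.getElem?_map, List.getElem?_eq_getElem hk']
    rfl
  rw [hgetD]
  have hexp : (((l.length:Int)) - ((k:Nat):Int) - 1).toNat = l.length - 1 - k := by omega
  rw [hexp]
  rfl

-- the two loops run in lock-step: B's accumulator is always calc-of-A's buffer
lemma pv_loop_eq (binstr : List Char) : ∀ (fuel : Nat) (litstr : List Char) (pos : Int),
    pvLoopB binstr fuel (litstr.foldl (fun v c => v * 2 + (PySem.Int.ofChars? [c]).getD 0) 0) pos
      = ((pvLoopA binstr fuel litstr pos).1.foldl
            (fun v c => v * 2 + (PySem.Int.ofChars? [c]).getD 0) 0,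
         (pvLoopA binstr fuel litstr pos).2) := by
  intro fuel
  induction fuel with
  | zero => intro litstr pos; rfl
  | succ n ih =>
    intro litstr pos
    cases h : PySem.Chars.pyGet? binstr pos with
    | none => simp only [pvLoopA, pvLoopB, h]
    | some indicator =>
      by_cases hi : indicator = '1'
      · subst hi
        simp only [pvLoopA, pvLoopB, h, ne_eq, not_true_eq_false, if_false]
        rw [← List.foldl_append]
        exact ih _ _
      · simp only [pvLoopA, pvLoopB, h, ne_eq, hi, not_false_eq_true, if_true, if_false, List.foldl_append]

-- ===== VERDICT (by name: the statement is the Claim_ definition above) =====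
theorem extract_literal_spec : Claim_equal_extract_literal := by
  intro binstr start_pos _ _
  have h := pv_loop_eq binstr.toList (binstr.toList.length + 1) [] start_pos
  simp only [List.foldl_nil] at h
  simp only [Spec_extract_literal, extract_literal, extract_literal_alt, h, pv_calc_eq]
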